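-- pv_equiv track=rewrite | github.com/ksaubhri12/ds_algo | practice_450/array/19_rearrange_positive_negative_number.py | rearrange_positive_negative_number
-- ===== SOURCE A (Python) =====
-- def rearrange_positive_negative_number(arr: [], n):
--     positive_queue = []
--     negative_queue = []
--     final_array = []
--
--     for i in range(0, n):
--         element = arr[i]
--         if element >= 0:
--             positive_queue.append(element)
--         else:
--             negative_queue.append(element)
--
--     i = 0
--     while i < n:
--         positive_element = None
--         negative_element = None
--         if len(positive_queue) > 0:
--             positive_element = positive_queue.pop(0)
--         if len(negative_queue) > 0:
--             negative_element = negative_queue.pop(0)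
--         if positive_element is not None:
--             i = i + 1
--             final_array.append(positive_element)
--         if negative_element is not None:
--             i = i + 1
--             final_array.append(negative_element)
--
--     return final_array
-- ===== SOURCE B (Python) =====
-- def rearrange_positive_negative_number(arr, n):
--     pos = []
--     neg = []
--     for i in range(n):
--         e = arr[i]
--         if e >= 0:
--             pos.append(e)
--         else:
--             neg.append(e)
--     m = min(len(pos), len(neg))
--     res = [None] * (len(pos) + len(neg))
--     for k in range(m):
--         res[2 * k] = pos[k]
--         res[2 * k + 1] = neg[k]
--     res[2 * m:] = pos[m:] if len(pos) > len(neg) else neg[m:]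
--     return res
-- ===== Notes on version B (the rewrite author's own statement) =====
-- stated objective: faster
-- what changed: A drains two queues with pop(0) inside a while loop guarded by a running counter; B computes placements directly: m = min(len(pos), len(neg)) interleaved pairs written at indices 2k/2k+1 into a preallocated result, then the leftover tail copied in one slice assignment, removing the quadratic front-pop shifting.
import Mathlib
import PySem

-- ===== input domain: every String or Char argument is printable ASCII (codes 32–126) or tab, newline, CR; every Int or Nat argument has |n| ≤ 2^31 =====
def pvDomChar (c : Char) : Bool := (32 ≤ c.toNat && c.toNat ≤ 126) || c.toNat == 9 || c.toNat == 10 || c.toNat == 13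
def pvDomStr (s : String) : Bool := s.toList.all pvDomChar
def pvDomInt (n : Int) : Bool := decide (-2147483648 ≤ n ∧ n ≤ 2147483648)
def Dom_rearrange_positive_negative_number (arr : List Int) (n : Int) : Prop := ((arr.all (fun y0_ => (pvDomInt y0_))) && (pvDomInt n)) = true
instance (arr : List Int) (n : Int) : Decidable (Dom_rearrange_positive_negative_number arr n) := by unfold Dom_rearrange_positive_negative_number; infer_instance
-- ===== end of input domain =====

-- B replaces A's pop-from-two-queues while loop (with a running counter i) by a direct
-- index computation: m = min(len(pos), len(neg)) interleaved pairs, then the leftover tail.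
-- Objective: simpler (and avoids quadratic pop(0) cost; the proved claim is about values only).

-- ===== PORT A =====
-- first loop of A: partition arr[0..n-1] into the positive and negative queues
def pvPartitionA (arr : List Int) (n : Int) : List Int × List Int :=
  (PySem.List.pyRange 0 n 1).foldl
    (fun pq i =>
      let e := (PySem.List.pyGet? arr i).getD 0   -- arr[i]; Pre_ excludes the out-of-range IndexError
      if e ≥ 0 then (pq.1 ++ [e], pq.2) else (pq.1, pq.2 ++ [e]))
    ([], [])

-- A's while loop: pop the front of each queue while i < n
def pvWhileA (n : Int) (pos neg : List Int) (i : Int) (acc : List Int) : List Int :=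
  if i < n then
    match pos, neg with
    | [], [] => acc   -- here Python's while loop makes no progress (diverges); unreachable for the queues A builds
    | p :: ps, [] => pvWhileA n ps [] (i + 1) (acc ++ [p])
    | [], q :: qs => pvWhileA n [] qs (i + 1) (acc ++ [q])
    | p :: ps, q :: qs => pvWhileA n ps qs (i + 2) (acc ++ [p, q])
  else acc
termination_by pos.length + neg.length
decreasing_by all_goals first | (simp; omega) | simp

def rearrange_positive_negative_number (arr : List Int) (n : Int) : List Int :=
  let pq := pvPartitionA arr n
  pvWhileA n pq.1 pq.2 0 []

-- ===== PORT B =====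
-- B's first loop is the same sign partition as A's
def pvPartitionB (arr : List Int) (n : Int) : List Int × List Int :=
  (PySem.List.pyRange 0 n 1).foldl
    (fun pq i =>
      let e := (PySem.List.pyGet? arr i).getD 0   -- arr[i]; Pre_ excludes the out-of-range IndexError
      if e ≥ 0 then (pq.1 ++ [e], pq.2) else (pq.1, pq.2 ++ [e]))
    ([], [])

def rearrange_positive_negative_number_alt (arr : List Int) (n : Int) : List Int :=
  let pq := pvPartitionB arr n
  let pos := pq.1
  let neg := pq.2
  let m := min pos.length neg.length
  -- res[2k] = pos[k], res[2k+1] = neg[k] for k < m, then the leftover tail at res[2m:]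
  ((List.range m).flatMap (fun k => [pos.getD k 0, neg.getD k 0])) ++
    (if neg.length < pos.length then pos.drop m else neg.drop m)

-- ===== PRECONDITION & SPEC =====
-- Pre_ excludes exactly the inputs where arr[i] raises IndexError in A's first loop: n > len(arr).
def Pre_rearrange_positive_negative_number (arr : List Int) (n : Int) : Prop :=
  n ≤ (arr.length : Int)
instance (arr : List Int) (n : Int) : Decidable (Pre_rearrange_positive_negative_number arr n) := by
  unfold Pre_rearrange_positive_negative_number; infer_instance

def pvWitness_rearrange_positive_negative_number : List Int × Int := ([3, -1, 4, -2, 5], 5)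

def Spec_rearrange_positive_negative_number (arr : List Int) (n : Int) (out : List Int) : Prop := out = rearrange_positive_negative_number_alt arr n
instance (arr : List Int) (n : Int) (out : List Int) : Decidable (Spec_rearrange_positive_negative_number arr n out) := by unfold Spec_rearrange_positive_negative_number; infer_instance

-- ===== CLAIM (what is proved, stated in full; the proofs are below) =====
def Claim_equal_rearrange_positive_negative_number : Prop := ∀ (arr : List Int) (n : Int), Dom_rearrange_positive_negative_number arr n → Pre_rearrange_positive_negative_number arr n → Spec_rearrange_positive_negative_number arr n (rearrange_positive_negative_number arr n)

-- ===== LEMMAS AND PROOFS =====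

-- the common value both programs compute: pos and neg interleaved, longer tail last
def pvIl : List Int → List Int → List Int
  | [], qs => qs
  | ps, [] => ps
  | p :: ps, q :: qs => p :: q :: pvIl ps qs

theorem pvIl_nil_right (ps : List Int) : pvIl ps [] = ps := by
  cases ps <;> rfl

theorem pvWhileA_nil_left (n : Int) (qs : List Int) (i : Int) (acc : List Int)
    (h : (qs.length : Int) = n - i) : pvWhileA n [] qs i acc = acc ++ qs := by
  induction qs generalizing i acc with
  | nil => rw [pvWhileA]; simp_all
  | cons q qs ih =>
    rw [pvWhileA]
    have : i < n := by simp at h; omega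
    simp only [if_pos this]
    rw [ih (i + 1) (acc ++ [q]) (by simp at h ⊢; omega)]
    simp

theorem pvWhileA_nil_right (n : Int) (ps : List Int) (i : Int) (acc : List Int)
    (h : (ps.length : Int) = n - i) : pvWhileA n ps [] i acc = acc ++ ps := by
  induction ps generalizing i acc with
  | nil => rw [pvWhileA]; simp_all
  | cons p ps ih =>
    rw [pvWhileA]
    have : i < n := by simp at h; omega
    simp only [if_pos this]
    cases ps with
    | nil => rw [pvWhileA]; simp
    | cons p' ps' =>
      rw [ih (i + 1) (acc ++ [p]) (by simp at h ⊢; omega)]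
      simp

theorem pvWhileA_eq_pvIl (pos : List Int) (n : Int) (neg : List Int) (i : Int) (acc : List Int)
    (h : (pos.length : Int) + (neg.length : Int) = n - i) :
    pvWhileA n pos neg i acc = acc ++ pvIl pos neg := by
  induction pos generalizing neg i acc with
  | nil => rw [pvIl]; exact pvWhileA_nil_left n neg i acc (by simpa using h)
  | cons p ps ih =>
    cases neg with
    | nil =>
      rw [pvIl_nil_right]
      exact pvWhileA_nil_right n (p :: ps) i acc (by simpa using h)
    | cons q qs =>
      rw [pvWhileA]
      have : i < n := by simp at h; omega
      simp only [if_pos this]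
      rw [ih qs (i + 2) (acc ++ [p, q]) (by simp at h ⊢; omega)]
      simp [pvIl]

theorem pvAlt_body_eq_pvIl (pos neg : List Int) :
    ((List.range (min pos.length neg.length)).flatMap
        (fun k => [pos.getD k 0, neg.getD k 0])) ++
      (if neg.length < pos.length then pos.drop (min pos.length neg.length)
       else neg.drop (min pos.length neg.length)) = pvIl pos neg := by
  induction pos generalizing neg with
  | nil => simp [pvIl]
  | cons p ps ih =>
    cases neg with
    | nil => simp [pvIl_nil_right]
    | cons q qs =>
      have hmin : min (p :: ps).length (q :: qs).length = min ps.length qs.length + 1 := by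
        simp [Nat.succ_min_succ]
      rw [hmin, List.range_succ_eq_map]
      simp only [List.flatMap_cons, List.flatMap_map, List.getD_cons_zero, List.getD_cons_succ,
        List.drop_succ_cons, List.length_cons, pvIl, List.cons_append, List.nil_append,
        Nat.add_lt_add_iff_right]
      rw [ih qs]

theorem pvPartition_length (arr : List Int) (l : List Int) (s : List Int × List Int) :
    ((l.foldl (fun pq i =>
        let e := (PySem.List.pyGet? arr i).getD 0
        if e ≥ 0 then (pq.1 ++ [e], pq.2) else (pq.1, pq.2 ++ [e])) s).1.length
      + (l.foldl (fun pq i =>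
        let e := (PySem.List.pyGet? arr i).getD 0
        if e ≥ 0 then (pq.1 ++ [e], pq.2) else (pq.1, pq.2 ++ [e])) s).2.length)
      = s.1.length + s.2.length + l.length := by
  induction l generalizing s with
  | nil => simp
  | cons x xs ih =>
    simp only [List.foldl_cons]
    rw [ih]
    by_cases h : (PySem.List.pyGet? arr x).getD 0 ≥ 0 <;> simp [h] <;> omega

-- ===== VERDICT (by name: the statement is the Claim_ definition above) =====
theorem rearrange_positive_negative_number_spec : Claim_equal_rearrange_positive_negative_number := by
  intro arr n _ _
  unfold Spec_rearrange_positive_negative_number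
  unfold rearrange_positive_negative_number rearrange_positive_negative_number_alt
  have hpp : pvPartitionB arr n = pvPartitionA arr n := rfl
  rw [hpp]
  set pq := pvPartitionA arr n with hpq
  by_cases hn : n ≤ 0
  · have hr : PySem.List.pyRange 0 n 1 = [] := PySem.List.pyRange_one_eq_nil (by omega)
    have : pq = ([], []) := by rw [hpq]; unfold pvPartitionA; rw [hr]; rfl
    rw [this]
    rw [pvWhileA]
    simp
  · have hlen : (pq.1.length : Int) + (pq.2.length : Int) = n - 0 := by
      have h1 := pvPartition_length arr (PySem.List.pyRange 0 n 1) ([], [])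
      have h2 : (PySem.List.pyRange 0 n 1).length = (n - 0).toNat :=
        PySem.List.length_pyRange_one 0 n
      have hz1 : (([] : List Int), ([] : List Int)).1.length = 0 := rfl
      have hz2 : (([] : List Int), ([] : List Int)).2.length = 0 := rfl
      rw [hpq]; unfold pvPartitionA
      omega
    rw [pvWhileA_eq_pvIl pq.1 n pq.2 0 [] hlen]
    rw [pvAlt_body_eq_pvIl pq.1 pq.2]
    simp
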